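-- pv_equiv track=rewrite | github.com/raamtambe/EmmaNeigh | desktop-app/python/execution_version.py | compress_lines
-- ===== SOURCE A (Python) =====
-- def compress_lines(lines, max_lines=12, max_chars=900):
--     parts = []
--     total_chars = 0
--     for line in lines[:max_lines]:
--         projected = total_chars + len(line) + (3 if parts else 0)
--         if projected > max_chars:
--             break
--         parts.append(line)
--         total_chars = projected
--     return ' | '.join(parts)
-- ===== SOURCE B (Python) =====
-- def compress_lines(lines, max_lines=12, max_chars=900):
--     head = lines[:max_lines]
--     # costs[k-1] = cost of joining the first k lines with ' | ' = sum(lens) + 3*(k-1)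
--     costs = []
--     c = -3
--     for s in head:
--         c += len(s) + 3
--         costs.append(c)
--     k = 0
--     while k < len(costs) and costs[k] <= max_chars:
--         k += 1
--     return ' | '.join(head[:k])
-- ===== Notes on version B (the rewrite author's own statement) =====
-- stated objective: alternative
-- what changed: Replaces the inline running-sum-with-break loop that appends lines one by one by a precomputed prefix-cost table (cost of joining the first k lines) followed by a boundary scan for the longest affordable prefix, then a single join of that prefix.
import Mathlib
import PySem

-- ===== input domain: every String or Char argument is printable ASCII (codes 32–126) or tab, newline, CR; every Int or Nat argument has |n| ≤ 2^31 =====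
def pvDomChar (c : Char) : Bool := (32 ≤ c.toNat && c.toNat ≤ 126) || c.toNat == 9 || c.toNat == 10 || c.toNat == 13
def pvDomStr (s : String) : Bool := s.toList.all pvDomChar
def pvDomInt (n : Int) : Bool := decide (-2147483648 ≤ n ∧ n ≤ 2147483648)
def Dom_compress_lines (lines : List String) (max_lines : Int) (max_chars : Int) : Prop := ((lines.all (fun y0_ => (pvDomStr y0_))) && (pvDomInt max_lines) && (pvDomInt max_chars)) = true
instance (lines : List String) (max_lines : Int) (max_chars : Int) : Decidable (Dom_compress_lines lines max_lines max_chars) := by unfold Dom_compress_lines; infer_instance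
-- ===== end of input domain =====

-- B replaces A's inline running-sum-with-break by a prefix-cost table plus a
-- boundary scan for the longest affordable prefix (objective: alternative).

-- ===== PORT A =====
-- the for-loop of A: state (parts, total_chars); 'break' returns parts
def compressLoopA (max_chars : Int) : List String → List String → Int → List String
  | [], parts, _ => parts
  | l :: rest, parts, total =>
    let projected := total + PySem.Str.len l + (if parts ≠ [] then 3 else 0)
    if projected > max_chars then parts
    else compressLoopA max_chars rest (parts ++ [l]) projected

def compress_lines (lines : List String) (max_lines : Int) (max_chars : Int) : String :=
  PySem.Str.join " | " (compressLoopA max_chars (PySem.List.slice lines none (some max_lines)) [] 0)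

-- ===== PORT B =====
-- 'for s in head: c += len(s) + 3; costs.append(c)' starting from c = -3
def costsOfB : List String → Int → List Int
  | [], _ => []
  | s :: rest, c => (c + PySem.Str.len s + 3) :: costsOfB rest (c + PySem.Str.len s + 3)

-- 'while k < len(costs) and costs[k] <= max_chars: k += 1'
def findKB (max_chars : Int) : List Int → Nat
  | [] => 0
  | c :: rest => if c ≤ max_chars then findKB max_chars rest + 1 else 0

def compress_lines_alt (lines : List String) (max_lines : Int) (max_chars : Int) : String :=
  let head := PySem.List.slice lines none (some max_lines)
  let costs := costsOfB head (-3)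
  let k := findKB max_chars costs
  PySem.Str.join " | " (PySem.List.slice head none (some (k : Int)))

-- ===== PRECONDITION & SPEC =====
def Spec_compress_lines (lines : List String) (max_lines : Int) (max_chars : Int) (out : String) : Prop := out = compress_lines_alt lines max_lines max_chars
instance (lines : List String) (max_lines : Int) (max_chars : Int) (out : String) : Decidable (Spec_compress_lines lines max_lines max_chars out) := by unfold Spec_compress_lines; infer_instance

-- ===== CLAIM (what is proved, stated in full; the proofs are below) =====
def Claim_equal_compress_lines : Prop := ∀ (lines : List String) (max_lines : Int) (max_chars : Int), Dom_compress_lines lines max_lines max_chars → Spec_compress_lines lines max_lines max_chars (compress_lines lines max_lines max_chars)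

-- ===== LEMMAS AND PROOFS =====

-- Loop invariant: A's loop extends 'parts' by exactly the prefix of ls whose
-- prefix costs (accumulated from c = -3 when parts is empty, else from total) stay ≤ max_chars.
lemma compressLoopA_eq (mc : Int) :
    ∀ (ls parts : List String) (total : Int), (parts = [] → total = 0) →
      compressLoopA mc ls parts total
        = parts ++ ls.take (findKB mc (costsOfB ls (if parts = [] then -3 else total))) := by
  intro ls
  induction ls with
  | nil => intro parts total _; simp [compressLoopA, costsOfB, findKB]
  | cons l rest ih =>
    intro parts total h0
    simp only [compressLoopA, costsOfB, findKB]
    by_cases hp : parts = []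
    · subst hp
      have ht : total = 0 := h0 rfl
      subst ht
      simp only [ne_eq, not_true_eq_false, if_false, if_true]
      by_cases hb : (-3 : Int) + PySem.Str.len l + 3 ≤ mc
      · rw [if_pos hb, if_neg (show ¬ (0 + PySem.Str.len l + 0 > mc) by omega),
            ih ([] ++ [l]) (0 + PySem.Str.len l + 0) (by simp)]
        simp
      · rw [if_neg hb, if_pos (show 0 + PySem.Str.len l + 0 > mc by omega)]
        simp
    · simp only [hp, ne_eq, not_false_eq_true, if_true, if_false]
      by_cases hb : total + PySem.Str.len l + 3 ≤ mc
      · rw [if_pos hb, if_neg (show ¬ (total + PySem.Str.len l + 3 > mc) by omega),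
            ih (parts ++ [l]) (total + PySem.Str.len l + 3) (by simp)]
        simp
      · rw [if_neg hb, if_pos (show total + PySem.Str.len l + 3 > mc by omega)]
        simp

-- ===== VERDICT (by name: the statement is the Claim_ definition above) =====
theorem compress_lines_spec : Claim_equal_compress_lines := by
  intro lines max_lines max_chars _
  unfold Spec_compress_lines compress_lines compress_lines_alt
  rw [compressLoopA_eq max_chars _ [] 0 (fun _ => rfl)]
  simp [PySem.List.slice_to_natCast]
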